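-- pv_equiv track=rewrite | github.com/jose-car95/python_modules | python_module_03/ex5/ft_data_stream.py | game_event_stream
-- ===== SOURCE A (Python) =====
-- def game_event_stream(n: int):
--     """
--     Debe devolver tuples tipo: (player, level, action)
--     ("alice", 5, "killed monster")
--     ("bob", 12, "found treasure")
--     ("charlie", 8, "leveled up")
--     """
--     for i in range(n):
--         # PLAYER
--         if i % 3 == 0:
--             player = "alice"
--         elif i % 3 == 1:
--             player = "bob"
--         else:
--             player = "charlie"
--
--         # LEVEL
--         level = (i % 15) + 1
--
--         # ACTION
--         if i % 3 == 0:
--             action = "killed monster"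
--         elif i % 3 == 1:
--             action = "found treasure"
--         else:
--             action = "leveled up"
--
--         yield player, level, action
-- ===== SOURCE B (Python) =====
-- _ROLES = [("alice", "killed monster"),
--           ("bob", "found treasure"),
--           ("charlie", "leveled up")]
--
-- # The whole event pattern repeats with period 15 (lcm of the role cycle 3
-- # and the level cycle 15): precompute one full period once.
-- _BASE = [(_ROLES[i % 3][0], i + 1, _ROLES[i % 3][1]) for i in range(15)]
--
-- def game_event_stream(n: int):
--     if n <= 0:
--         return
--     q, r = divmod(n, 15)
--     for _ in range(q):
--         yield from _BASE
--     yield from _BASE[:r]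
-- ===== Notes on version B (the rewrite author's own statement) =====
-- stated objective: alternative
-- what changed: B exploits the period-15 structure: it precomputes one full 15-event cycle from a role table and emits floor(n/15) whole cycles plus a prefix via divmod, replacing A's two per-index if/elif chains with a single table-driven lookup.
import Mathlib
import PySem

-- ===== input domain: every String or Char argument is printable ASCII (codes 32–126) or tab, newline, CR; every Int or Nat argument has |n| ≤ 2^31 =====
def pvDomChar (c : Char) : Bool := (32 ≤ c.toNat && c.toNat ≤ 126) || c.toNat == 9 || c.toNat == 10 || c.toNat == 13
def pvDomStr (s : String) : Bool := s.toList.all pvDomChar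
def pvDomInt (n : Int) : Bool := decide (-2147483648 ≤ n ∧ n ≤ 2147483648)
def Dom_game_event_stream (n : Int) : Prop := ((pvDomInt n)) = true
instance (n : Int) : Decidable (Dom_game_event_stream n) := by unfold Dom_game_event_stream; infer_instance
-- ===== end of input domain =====

-- B replaces A's two per-index if/elif chains by one precomputed period-15 table
-- repeated floor(n/15) times plus a prefix (objective: alternative, same cost).
-- A is a generator; both ports return the list of yielded tuples.

-- ===== PORT A =====
def game_event_stream (n : Int) : List (String × Int × String) :=
  (PySem.List.pyRange 0 n 1).map (fun i =>
    let player : String :=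
      if PySem.Int.mod i 3 = 0 then "alice"
      else if PySem.Int.mod i 3 = 1 then "bob"
      else "charlie"
    let level : Int := PySem.Int.mod i 15 + 1
    let action : String :=
      if PySem.Int.mod i 3 = 0 then "killed monster"
      else if PySem.Int.mod i 3 = 1 then "found treasure"
      else "leveled up"
    (player, level, action))

-- ===== PORT B =====
def pvRoles : List (String × String) :=
  [("alice", "killed monster"), ("bob", "found treasure"), ("charlie", "leveled up")]

-- _BASE comprehension; _ROLES[i % 3] is always in range, so getD is exact here
def pvBase : List (String × Int × String) :=
  (List.range 15).map (fun i =>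
    let role := pvRoles.getD (i % 3) ("", "")
    (role.1, (i : Int) + 1, role.2))

def game_event_stream_alt (n : Int) : List (String × Int × String) :=
  if n ≤ 0 then []
  else
    match PySem.Int.divmod? n 15 with
    | none => []   -- unreachable: divisor 15 ≠ 0
    | some (q, r) =>
      (List.replicate q.toNat pvBase).flatten ++ PySem.List.slice pvBase none (some r)

-- ===== PRECONDITION & SPEC =====
def Spec_game_event_stream (n : Int) (out : List (String × Int × String)) : Prop := out = game_event_stream_alt n
instance (n : Int) (out : List (String × Int × String)) : Decidable (Spec_game_event_stream n out) := by unfold Spec_game_event_stream; infer_instance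

-- ===== CLAIM (what is proved, stated in full; the proofs are below) =====
def Claim_equal_game_event_stream : Prop := ∀ (n : Int), Dom_game_event_stream n → Spec_game_event_stream n (game_event_stream n)

-- ===== LEMMAS AND PROOFS =====

-- the per-index body of A, over Nat indices
def pvBody (k : Nat) : String × Int × String :=
  (if ((k : Int)) % 3 = 0 then "alice"
   else if ((k : Int)) % 3 = 1 then "bob" else "charlie",
   ((k : Int)) % 15 + 1,
   if ((k : Int)) % 3 = 0 then "killed monster"
   else if ((k : Int)) % 3 = 1 then "found treasure" else "leveled up")

theorem pvBody_periodic (k : Nat) : pvBody (k + 15) = pvBody k := by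
  unfold pvBody
  have h3 : ((k + 15 : Nat) : Int) % 3 = (k : Int) % 3 := by push_cast; omega
  have h15 : ((k + 15 : Nat) : Int) % 15 = (k : Int) % 15 := by push_cast; omega
  rw [h3, h15]

theorem pvBase_eq : pvBase = (List.range 15).map pvBody := by decide

theorem pvMain (m : Nat) :
    (List.range m).map pvBody =
      (List.replicate (m / 15) pvBase).flatten ++ pvBase.take (m % 15) := by
  induction m using Nat.strong_induction_on with
  | _ m ih =>
    by_cases h : m < 15
    · have hq : m / 15 = 0 := Nat.div_eq_of_lt h
      have hr : m % 15 = m := Nat.mod_eq_of_lt h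
      rw [hq, hr, pvBase_eq, ← List.map_take, List.take_range]
      simp [Nat.min_eq_left (le_of_lt h)]
    · obtain ⟨k, rfl⟩ : ∃ k, m = 15 + k := ⟨m - 15, by omega⟩
      have hk : k < 15 + k := by omega
      have hshift : (List.range k).map (fun j => pvBody (15 + j)) =
          (List.range k).map pvBody := by
        apply List.map_congr_left
        intro j _
        rw [Nat.add_comm, pvBody_periodic]
      rw [List.range_add, List.map_append, List.map_map, ← pvBase_eq]
      have hq : (15 + k) / 15 = k / 15 + 1 := by omega
      have hr : (15 + k) % 15 = k % 15 := by omega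
      rw [hq, hr, List.replicate_succ, List.flatten_cons, List.append_assoc]
      congr 1
      simpa [Function.comp] using (hshift.trans (ih k hk))

-- ===== VERDICT (by name: the statement is the Claim_ definition above) =====
theorem game_event_stream_spec : Claim_equal_game_event_stream := by
  intro n _
  unfold Spec_game_event_stream game_event_stream game_event_stream_alt
  by_cases hn : n ≤ 0
  · rw [PySem.List.pyRange_one_eq_nil (by omega)]
    simp [hn]
  · push Not at hn
    rw [if_neg (by omega)]
    simp only [PySem.Int.divmod?, if_neg (show ¬ (15:Int) = 0 by norm_num)]
    -- A's side as a map of pvBody over List.range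
    have hA : (PySem.List.pyRange 0 n 1).map (fun i =>
        (if PySem.Int.mod i 3 = 0 then "alice"
         else if PySem.Int.mod i 3 = 1 then "bob" else "charlie",
         PySem.Int.mod i 15 + 1,
         if PySem.Int.mod i 3 = 0 then "killed monster"
         else if PySem.Int.mod i 3 = 1 then "found treasure" else "leveled up"))
        = (List.range n.toNat).map pvBody := by
      rw [PySem.List.pyRange_one, List.map_map, Int.sub_zero]
      apply List.map_congr_left
      intro j _
      simp [pvBody]
    rw [hA, pvMain]
    -- identify the Nat-side quotient/remainder with the Int-side ones
    have hq : (n.fdiv 15).toNat = n.toNat / 15 := by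
      rw [Int.fdiv_eq_ediv, if_pos (Or.inl (by norm_num)), Int.sub_zero]; omega
    have hr : n.fmod 15 = ((n.toNat % 15 : Nat) : Int) := by
      rw [Int.fmod_eq_emod, if_pos (Or.inl (by norm_num)), Int.add_zero]; omega
    rw [hq, hr, PySem.List.slice_to_natCast]
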